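-- pv_equiv track=rewrite | github.com/raeez/chiral-bar-cobar | compute/lib/bar_higher_arity_engine.py | _sort_with_sign
-- ===== SOURCE A (Python) =====
-- from typing import Dict, FrozenSet, Iterable, List, Optional, Sequence, Tuple
--
-- def _sort_with_sign(lst: List[int]) -> Tuple[int, List[int]]:
--     """Return (sign, sorted_list) where sign is the parity of the permutation."""
--     n = len(lst)
--     a = list(lst)
--     sign = 1
--     for i in range(n):
--         for j in range(0, n - i - 1):
--             if a[j] > a[j + 1]:
--                 a[j], a[j + 1] = a[j + 1], a[j]
--                 sign = -sign
--     return sign, a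
-- ===== SOURCE B (Python) =====
-- from typing import List, Tuple
--
-- def _sort_with_sign(lst: List[int]) -> Tuple[int, List[int]]:
--     """Return (sign, sorted_list): merge sort counting inversions; sign = (-1)**inversions."""
--     def msort(a):
--         n = len(a)
--         if n < 2:
--             return a, 0
--         mid = n // 2
--         left, inv_l = msort(a[:mid])
--         right, inv_r = msort(a[mid:])
--         merged = []
--         inv = inv_l + inv_r
--         i = j = 0
--         while i < len(left) and j < len(right):
--             if left[i] <= right[j]:
--                 merged.append(left[i]); i += 1
--             else:
--                 merged.append(right[j]); inv += len(left) - i; j += 1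
--         merged += left[i:]
--         merged += right[j:]
--         return merged, inv
--     srt, inv = msort(list(lst))
--     return (1 if inv % 2 == 0 else -1), srt
-- ===== Notes on version B (the rewrite author's own statement) =====
-- stated objective: faster
-- what changed: Replaced the in-place bubble sort that flips the sign on every adjacent swap by a merge sort that counts inversions and takes sign = (-1)**inversions.
import Mathlib
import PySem

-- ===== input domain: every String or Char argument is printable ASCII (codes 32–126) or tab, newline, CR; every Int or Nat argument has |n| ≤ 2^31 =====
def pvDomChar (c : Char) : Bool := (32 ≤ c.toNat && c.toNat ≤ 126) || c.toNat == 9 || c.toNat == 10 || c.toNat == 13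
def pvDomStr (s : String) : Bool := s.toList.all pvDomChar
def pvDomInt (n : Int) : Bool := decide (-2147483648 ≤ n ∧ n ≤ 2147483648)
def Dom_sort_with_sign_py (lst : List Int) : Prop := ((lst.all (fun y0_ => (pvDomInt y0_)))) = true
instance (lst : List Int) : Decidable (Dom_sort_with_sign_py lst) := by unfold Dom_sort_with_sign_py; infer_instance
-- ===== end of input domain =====

-- B replaces A's bubble sort (sign flipped per adjacent swap) by a merge sort counting
-- inversions, sign = (-1)^inversions; objective: faster (asymptotic, O(n log n) vs O(n^2)).

-- ===== PORT A =====
-- one iteration of the inner `for j in range(0, n - i - 1)` body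
def pvInnerStep (st : List Int × Int) (j : Int) : List Int × Int :=
  if PySem.List.pyGetD st.1 (j + 1) 0 < PySem.List.pyGetD st.1 j 0 then
    (PySem.List.pySetD (PySem.List.pySetD st.1 j (PySem.List.pyGetD st.1 (j + 1) 0)) (j + 1)
       (PySem.List.pyGetD st.1 j 0), -st.2)
  else st

-- the inner loop for one value of i
def pvInnerLoop (n : Int) (st : List Int × Int) (i : Int) : List Int × Int :=
  List.foldl pvInnerStep st (PySem.List.pyRange 0 (n - i - 1) 1)

def sort_with_sign_py (lst : List Int) : Int × List Int :=
  let n : Int := PySem.List.len lst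
  let st := List.foldl (pvInnerLoop n) (lst, 1) (PySem.List.pyRange 0 n 1)
  (st.2, st.1)

-- ===== PORT B =====
-- the `while i < len(left) and j < len(right)` merge loop of Source B, with (i, j) kept as
-- the remaining suffixes of left/right; the trailing `merged += left[i:]; merged += right[j:]`
-- are the two base cases
def pvMergeCount : List Int → List Int → List Int × Int
  | [], ys => (ys, 0)
  | x :: xs, [] => (x :: xs, 0)
  | x :: xs, y :: ys =>
    if x ≤ y then
      let m := pvMergeCount xs (y :: ys)
      (x :: m.1, m.2)
    else
      let m := pvMergeCount (x :: xs) ys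
      (y :: m.1, m.2 + PySem.List.len (x :: xs))

-- msort of Source B: split at n // 2, recurse, merge counting cross inversions
def pvMsortCount (a : List Int) : List Int × Int :=
  if h : a.length < 2 then (a, 0)
  else
    let mid := a.length / 2
    let l := pvMsortCount (a.take mid)
    let r := pvMsortCount (a.drop mid)
    let m := pvMergeCount l.1 r.1
    (m.1, l.2 + r.2 + m.2)
termination_by a.length
decreasing_by
  · simp [List.length_take]; omega
  · simp [List.length_drop]; omega

def sort_with_sign_py_alt (lst : List Int) : Int × List Int :=
  let p := pvMsortCount lst
  ((if PySem.Int.mod p.2 2 = 0 then 1 else -1), p.1)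

-- ===== PRECONDITION & SPEC =====
def Spec_sort_with_sign_py (lst : List Int) (out : Int × List Int) : Prop := out = sort_with_sign_py_alt lst
instance (lst : List Int) (out : Int × List Int) : Decidable (Spec_sort_with_sign_py lst out) := by unfold Spec_sort_with_sign_py; infer_instance

-- ===== CLAIM (what is proved, stated in full; the proofs are below) =====
def Claim_equal_sort_with_sign_py : Prop := ∀ (lst : List Int), Dom_sort_with_sign_py lst → Spec_sort_with_sign_py lst (sort_with_sign_py lst)

-- ===== LEMMAS AND PROOFS =====

-- number of inversions of a list
def pvInv : List Int → Nat
  | [] => 0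
  | x :: xs => xs.countP (fun z => decide (z < x)) + pvInv xs

-- cross inversions between two lists
def pvCross (l r : List Int) : Nat :=
  (l.map (fun x => r.countP (fun z => decide (z < x)))).sum

-- one bubble pass doing M adjacent comparisons, structurally
def pvBpassN : Nat → List Int → List Int × Int
  | 0, a => (a, 1)
  | _ + 1, [] => ([], 1)
  | _ + 1, [x] => ([x], 1)
  | m + 1, x :: y :: t =>
    if y < x then
      let p := pvBpassN m (x :: t)
      (y :: p.1, -p.2)
    else
      let p := pvBpassN m (y :: t)
      (x :: p.1, p.2)

-- Nat-indexed version of pvInnerStep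
def pvNStep (st : List Int × Int) (j : Nat) : List Int × Int :=
  if st.1.getD (j + 1) 0 < st.1.getD j 0 then
    ((st.1.set j (st.1.getD (j + 1) 0)).set (j + 1) (st.1.getD j 0), -st.2)
  else st

lemma pvInnerStep_natCast (st : List Int × Int) (k : Nat) :
    pvInnerStep st (k : Int) = pvNStep st k := by
  simp only [pvInnerStep, pvNStep]
  have h1 : ((k : Int) + 1) = ((k + 1 : Nat) : Int) := by push_cast; ring
  rw [h1]
  simp only [PySem.List.pyGetD_natCast, PySem.List.pySetD_natCast]

lemma pvFold_inner_eq_nat (M : Nat) (st : List Int × Int) :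
    List.foldl pvInnerStep st (PySem.List.pyRange 0 (M : Int) 1) =
      List.foldl pvNStep st (List.range M) := by
  rw [PySem.List.pyRange_one]
  simp [List.foldl_map, pvInnerStep_natCast]

lemma pvNStep_cons (h : Int) (x : List Int) (s : Int) (j : Nat) :
    pvNStep (h :: x, s) (j + 1) = (h :: (pvNStep (x, s) j).1, (pvNStep (x, s) j).2) := by
  simp only [pvNStep, List.getD_cons_succ, List.set_cons_succ]
  split <;> simp

lemma pvFold_shift (js : List Nat) (h : Int) (x : List Int) (s : Int) :
    List.foldl pvNStep (h :: x, s) (js.map (· + 1)) =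
      (h :: (List.foldl pvNStep (x, s) js).1, (List.foldl pvNStep (x, s) js).2) := by
  induction js generalizing x s with
  | nil => simp
  | cons j js ih =>
    simp only [List.map_cons, List.foldl_cons, pvNStep_cons]
    rw [← ih]

lemma pvFold_eq_bpassN : ∀ (M : Nat) (a : List Int) (s : Int), M < a.length →
    List.foldl pvNStep (a, s) (List.range M) = ((pvBpassN M a).1, s * (pvBpassN M a).2) := by
  intro M
  induction M with
  | zero => intro a s _; simp [pvBpassN]
  | succ M ih =>
    intro a s hlen
    match a with
    | [] => simp at hlen
    | [x] => simp at hlen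
    | x :: y :: t =>
      rw [List.range_succ_eq_map]
      simp only [List.foldl_cons]
      have hstep : pvNStep (x :: y :: t, s) 0 =
          if y < x then (y :: x :: t, -s) else (x :: y :: t, s) := by
        simp only [pvNStep, List.getD_cons_zero, List.getD_cons_succ, List.set_cons_zero,
          List.set_cons_succ]
      have hm : M < (x :: t).length := by simp at hlen ⊢; omega
      by_cases hxy : y < x
      · rw [hstep]; simp only [hxy, if_pos]
        have := pvFold_shift (List.range M) y (x :: t) (-s)
        simp only [show (List.range M).map (· + 1) = (List.range M).map Nat.succ from rfl] at this
        rw [this, ih (x :: t) (-s) hm]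
        simp [pvBpassN, hxy, mul_comm]
      · rw [hstep]; simp only [hxy, if_neg, not_false_iff]
        have := pvFold_shift (List.range M) x (y :: t) s
        simp only [show (List.range M).map (· + 1) = (List.range M).map Nat.succ from rfl] at this
        have hm' : M < (y :: t).length := by simp at hlen ⊢; omega
        rw [this, ih (y :: t) s hm']
        simp [pvBpassN, hxy]

lemma pvBpassN_perm : ∀ (M : Nat) (a : List Int), (pvBpassN M a).1.Perm a := by
  intro M
  induction M with
  | zero => intro a; simp [pvBpassN]
  | succ M ih =>
    intro a
    match a with
    | [] => simp [pvBpassN]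
    | [x] => simp [pvBpassN]
    | x :: y :: t =>
      by_cases hxy : y < x
      · simp only [pvBpassN, hxy, if_pos]
        exact ((ih (x :: t)).cons y).trans (List.Perm.swap x y t)
      · simp only [pvBpassN, hxy, if_neg, not_false_iff]
        exact (ih (y :: t)).cons x

lemma pvBpassN_sign : ∀ (M : Nat) (a : List Int),
    (pvBpassN M a).2 * (-1 : Int) ^ pvInv (pvBpassN M a).1 = (-1 : Int) ^ pvInv a := by
  intro M
  induction M with
  | zero => intro a; simp [pvBpassN]
  | succ M ih =>
    intro a
    match a with
    | [] => simp [pvBpassN]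
    | [x] => simp [pvBpassN]
    | x :: y :: t =>
      by_cases hxy : y < x
      · have ihx := ih (x :: t)
        have hpc : (pvBpassN M (x :: t)).1.countP (fun z => decide (z < y)) =
            t.countP (fun z => decide (z < y)) := by
          rw [(pvBpassN_perm M (x :: t)).countP_eq]
          simp [List.countP_cons, not_lt.mpr (le_of_lt hxy)]
        have ihx' : (pvBpassN M (x :: t)).2 * (-1 : Int) ^ pvInv (pvBpassN M (x :: t)).1 =
            (-1 : Int) ^ t.countP (fun z => decide (z < x)) * (-1 : Int) ^ pvInv t := by
          rw [ihx, show pvInv (x :: t) = t.countP (fun z => decide (z < x)) + pvInv t from rfl,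
            pow_add]
        have hinv : pvInv (x :: y :: t) =
            1 + t.countP (fun z => decide (z < x)) +
              (t.countP (fun z => decide (z < y)) + pvInv t) := by
          simp [pvInv, List.countP_cons, hxy]
          omega
        have hL : pvInv (y :: (pvBpassN M (x :: t)).1) =
            t.countP (fun z => decide (z < y)) + pvInv (pvBpassN M (x :: t)).1 := by
          simp [pvInv, hpc]
        simp only [pvBpassN, if_pos hxy]
        rw [hL, hinv]
        simp only [pow_add, pow_one]
        linear_combination (-((-1 : Int) ^ t.countP (fun z => decide (z < y)))) * ihx'
      · have ihy := ih (y :: t)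
        have hpc : (pvBpassN M (y :: t)).1.countP (fun z => decide (z < x)) =
            (y :: t).countP (fun z => decide (z < x)) :=
          (pvBpassN_perm M (y :: t)).countP_eq _
        have hL : pvInv (x :: (pvBpassN M (y :: t)).1) =
            (y :: t).countP (fun z => decide (z < x)) + pvInv (pvBpassN M (y :: t)).1 := by
          simp [pvInv, hpc]
        have hR : pvInv (x :: y :: t) =
            (y :: t).countP (fun z => decide (z < x)) + pvInv (y :: t) := rfl
        simp only [pvBpassN, if_neg hxy]
        rw [hL, hR]
        simp only [pow_add]
        linear_combination ((-1 : Int) ^ (y :: t).countP (fun z => decide (z < x))) * ihy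

lemma pvBpassN_max_aux : ∀ (n : Nat) (b : List Int), b.length = n + 1 →
    ∃ r' Mx, (pvBpassN n b).1 = r' ++ [Mx] ∧ ∀ z ∈ b, z ≤ Mx := by
  intro n
  induction n with
  | zero =>
    intro b hb
    match b with
    | [x] => exact ⟨[], x, by simp [pvBpassN], by simp⟩
  | succ n ih =>
    intro b hb
    match b with
    | x :: y :: t =>
      have ht : t.length = n := by simpa using hb
      by_cases hxy : y < x
      · obtain ⟨r', Mx, h1, h2⟩ := ih (x :: t) (by simp [ht])
        refine ⟨y :: r', Mx, by simp [pvBpassN, hxy, h1], ?_⟩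
        intro z hz
        simp only [List.mem_cons] at hz
        rcases hz with rfl | rfl | hz
        · exact h2 z (by simp)
        · exact le_of_lt (lt_of_lt_of_le hxy (h2 x (by simp)))
        · exact h2 z (by simp [hz])
      · obtain ⟨r', Mx, h1, h2⟩ := ih (y :: t) (by simp [ht])
        refine ⟨x :: r', Mx, by simp [pvBpassN, hxy, h1], ?_⟩
        intro z hz
        simp only [List.mem_cons] at hz
        rcases hz with rfl | rfl | hz
        · exact le_trans (not_lt.mp hxy) (h2 y (by simp))
        · exact h2 z (by simp)
        · exact h2 z (by simp [hz])

lemma pvBpassN_max : ∀ (b : List Int), b ≠ [] →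
    ∃ r' Mx, (pvBpassN (b.length - 1) b).1 = r' ++ [Mx] ∧ ∀ z ∈ b, z ≤ Mx := by
  intro b hb
  match b with
  | x :: s => exact pvBpassN_max_aux s.length (x :: s) (by simp)

lemma pvBpassN_append_aux : ∀ (n : Nat) (b c : List Int), b.length = n + 1 →
    pvBpassN n (b ++ c) = ((pvBpassN n b).1 ++ c, (pvBpassN n b).2) := by
  intro n
  induction n with
  | zero =>
    intro b c hb
    match b with
    | [x] => simp [pvBpassN]
  | succ n ih =>
    intro b c hb
    match b with
    | x :: y :: t =>
      have ht : t.length = n := by simpa using hb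
      by_cases hxy : y < x
      · have hrec := ih (x :: t) c (by simp [ht])
        simp only [List.cons_append, pvBpassN, if_pos hxy]
        simp only [List.cons_append] at hrec
        rw [hrec]
      · have hrec := ih (y :: t) c (by simp [ht])
        simp only [List.cons_append, pvBpassN, if_neg hxy]
        simp only [List.cons_append] at hrec
        rw [hrec]

lemma pvBpassN_append : ∀ (b c : List Int), b ≠ [] →
    pvBpassN (b.length - 1) (b ++ c) =
      ((pvBpassN (b.length - 1) b).1 ++ c, (pvBpassN (b.length - 1) b).2) := by
  intro b c hb
  match b with
  | x :: s => exact pvBpassN_append_aux s.length (x :: s) c (by simp)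

lemma pvInv_sorted_eq_zero : ∀ (a : List Int), a.Pairwise (· ≤ ·) → pvInv a = 0 := by
  intro a h
  induction a with
  | nil => simp [pvInv]
  | cons x xs ih =>
    rw [List.pairwise_cons] at h
    have h1 : xs.countP (fun z => decide (z < x)) = 0 := by
      rw [List.countP_eq_zero]
      intro z hz
      simp only [decide_eq_true_eq]
      exact not_lt.mpr (h.1 z hz)
    simp [pvInv, h1, ih h.2]

lemma pvInv_append (l r : List Int) : pvInv (l ++ r) = pvInv l + pvInv r + pvCross l r := by
  induction l with
  | nil => simp [pvInv, pvCross]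
  | cons x xs ih =>
    simp only [List.cons_append, pvInv, pvCross, List.countP_append, List.map_cons,
      List.sum_cons] at *
    omega

lemma pvCross_perm_left {l l' : List Int} (r : List Int) (h : l.Perm l') :
    pvCross l r = pvCross l' r := by
  exact (h.map (fun x => r.countP (fun z => decide (z < x)))).sum_eq

lemma pvCross_perm_right (l : List Int) {r r' : List Int} (h : r.Perm r') :
    pvCross l r = pvCross l r' := by
  unfold pvCross
  congr 1
  exact List.map_congr_left (fun x _ => h.countP_eq _)

-- A-side outer-loop invariant
def pvAInv (lst : List Int) (i : Nat) (st : List Int × Int) : Prop :=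
  st.1.Perm lst ∧ st.2 * (-1 : Int) ^ pvInv st.1 = (-1 : Int) ^ pvInv lst ∧
    ∃ b c, st.1 = b ++ c ∧ c.length = i ∧ c.Pairwise (· ≤ ·) ∧ ∀ u ∈ b, ∀ v ∈ c, u ≤ v

lemma pvOuter (lst : List Int) : ∀ i, i ≤ lst.length →
    pvAInv lst i (List.foldl (pvInnerLoop (lst.length : Int)) (lst, 1)
      (PySem.List.pyRange 0 (i : Int) 1)) := by
  intro i
  induction i with
  | zero =>
    intro _
    rw [PySem.List.pyRange_one_eq_nil (by omega)]
    exact ⟨List.Perm.refl _, by simp, lst, [], by simp, rfl, by simp, by simp⟩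
  | succ i ih =>
    intro hi
    have hlt : i < lst.length := by omega
    have prev := ih (le_of_lt hlt)
    rw [show ((i + 1 : Nat) : Int) = (i : Int) + 1 by push_cast; ring,
      PySem.List.pyRange_one_succ_right (by omega), List.foldl_append]
    set st := List.foldl (pvInnerLoop (lst.length : Int)) (lst, 1)
      (PySem.List.pyRange 0 (i : Int) 1) with hst
    obtain ⟨hperm, hsign, b, c, hsplit, hclen, hcsort, hbc⟩ := prev
    simp only [List.foldl_cons, List.foldl_nil]
    have hstlen : st.1.length = lst.length := hperm.length_eq
    have hblen : b.length = lst.length - i := by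
      have := congrArg List.length hsplit
      simp at this
      omega
    have hbne : b ≠ [] := by
      intro hb
      rw [hb] at hblen
      simp at hblen
      omega
    -- the inner loop is one bubble pass over the first (length - i) elements
    have hM : (lst.length : Int) - (i : Int) - 1 = ((lst.length - i - 1 : Nat) : Int) := by
      push_cast [Nat.cast_sub (le_of_lt hlt)]
      omega
    have hMlen : lst.length - i - 1 < st.1.length := by omega
    have hloop : pvInnerLoop (lst.length : Int) st (i : Int) =
        ((pvBpassN (lst.length - i - 1) st.1).1,
          st.2 * (pvBpassN (lst.length - i - 1) st.1).2) := by
      rw [pvInnerLoop, hM, pvFold_inner_eq_nat]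
      rw [show st = (st.1, st.2) from rfl]
      exact pvFold_eq_bpassN _ st.1 st.2 hMlen
    rw [hloop]
    have hMb : lst.length - i - 1 = b.length - 1 := by omega
    have hpass : pvBpassN (lst.length - i - 1) st.1 =
        ((pvBpassN (b.length - 1) b).1 ++ c, (pvBpassN (b.length - 1) b).2) := by
      rw [hMb, hsplit]
      exact pvBpassN_append b c hbne
    obtain ⟨r', Mx, hmax1, hmax2⟩ := pvBpassN_max b hbne
    have hpermb : (pvBpassN (b.length - 1) b).1.Perm b := pvBpassN_perm _ b
    refine ⟨?_, ?_, r', Mx :: c, ?_, ?_, ?_, ?_⟩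
    · -- permutation
      simp only [hpass]
      exact ((hpermb.append_right c).trans (hsplit ▸ List.Perm.refl st.1)).trans hperm
    · -- sign invariant
      simp only [hpass]
      have hsb := pvBpassN_sign (lst.length - i - 1) st.1
      calc st.2 * (pvBpassN (b.length - 1) b).2 *
            (-1 : Int) ^ pvInv ((pvBpassN (b.length - 1) b).1 ++ c)
          = st.2 * ((pvBpassN (lst.length - i - 1) st.1).2 *
            (-1 : Int) ^ pvInv (pvBpassN (lst.length - i - 1) st.1).1) := by
            simp [hpass]; ring
        _ = st.2 * (-1 : Int) ^ pvInv st.1 := by rw [hsb]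
        _ = (-1 : Int) ^ pvInv lst := hsign
    · -- shape
      simp only [hpass, hmax1]
      simp [List.append_assoc]
    · simp [hclen]
    · -- sortedness of Mx :: c
      rw [List.pairwise_cons]
      refine ⟨?_, hcsort⟩
      intro v hv
      have hMxb : Mx ∈ b := by
        have : Mx ∈ (pvBpassN (b.length - 1) b).1 := by rw [hmax1]; simp
        exact hpermb.mem_iff.mp this
      exact hbc Mx hMxb v hv
    · -- elements of r' are ≤ everything in Mx :: c
      intro u hu v hv
      have hub : u ∈ b := by
        have : u ∈ (pvBpassN (b.length - 1) b).1 := by rw [hmax1]; simp [hu]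
        exact hpermb.mem_iff.mp this
      rcases List.mem_cons.mp hv with rfl | hv
      · exact hmax2 u hub
      · exact hbc u hub v hv

lemma pvA_spec (lst : List Int) :
    (sort_with_sign_py lst).2.Perm lst ∧ (sort_with_sign_py lst).2.Pairwise (· ≤ ·) ∧
      (sort_with_sign_py lst).1 = (-1 : Int) ^ pvInv lst := by
  have h := pvOuter lst lst.length (le_refl _)
  obtain ⟨hperm, hsign, b, c, hsplit, hclen, hcsort, hbc⟩ := h
  set st := List.foldl (pvInnerLoop (lst.length : Int)) (lst, 1)
    (PySem.List.pyRange 0 (lst.length : Int) 1) with hst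
  have hrw : sort_with_sign_py lst = (st.2, st.1) := by
    simp only [sort_with_sign_py, PySem.List.len_eq, hst]
  have hb : b = [] := by
    have h1 : st.1.length = lst.length := hperm.length_eq
    have h2 := congrArg List.length hsplit
    simp at h2
    have : b.length = 0 := by omega
    exact List.length_eq_zero_iff.mp this
  have hstc : st.1 = c := by rw [hsplit, hb]; simp
  have hsort : st.1.Pairwise (· ≤ ·) := by rw [hstc]; exact hcsort
  have hinv0 : pvInv st.1 = 0 := pvInv_sorted_eq_zero _ hsort
  refine ⟨by rw [hrw]; exact hperm, by rw [hrw]; exact hsort, ?_⟩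
  rw [hrw]
  show st.2 = (-1 : Int) ^ pvInv lst
  rw [← hsign, hinv0]
  simp

lemma pvCross_nil_left (r : List Int) : pvCross [] r = 0 := by simp [pvCross]

lemma pvCross_nil_right (l : List Int) : pvCross l [] = 0 := by simp [pvCross]

lemma pvCross_cons_left (x : Int) (xs r : List Int) :
    pvCross (x :: xs) r = r.countP (fun z => decide (z < x)) + pvCross xs r := by
  simp [pvCross]

lemma pvCross_cons_right (l : List Int) (y : Int) (ys : List Int) :
    pvCross l (y :: ys) = l.countP (fun u => decide (y < u)) + pvCross l ys := by
  induction l with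
  | nil => simp [pvCross]
  | cons x xs ih =>
    simp only [pvCross, List.map_cons, List.sum_cons, List.countP_cons] at *
    omega

lemma pvMergeCount_spec : ∀ (l r : List Int), l.Pairwise (· ≤ ·) → r.Pairwise (· ≤ ·) →
    (pvMergeCount l r).1.Perm (l ++ r) ∧ (pvMergeCount l r).1.Pairwise (· ≤ ·) ∧
      (pvMergeCount l r).2 = (pvCross l r : Int) := by
  intro l
  induction l with
  | nil =>
    intro r _ hr
    refine ⟨by simp [pvMergeCount], by simpa [pvMergeCount] using hr, by simp [pvMergeCount, pvCross_nil_left]⟩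
  | cons x xs ihl =>
    intro r
    induction r with
    | nil =>
      intro hl _
      refine ⟨by simp [pvMergeCount], by simpa [pvMergeCount] using hl, by simp [pvMergeCount, pvCross_nil_right]⟩
    | cons y ys ihr =>
      intro hl hr
      have hl' := (List.pairwise_cons.mp hl).2
      have hlx := (List.pairwise_cons.mp hl).1
      have hr' := (List.pairwise_cons.mp hr).2
      have hry := (List.pairwise_cons.mp hr).1
      by_cases hxy : x ≤ y
      · obtain ⟨hp, hs, hc⟩ := ihl (y :: ys) hl' hr
        refine ⟨?_, ?_, ?_⟩
        · simpa [pvMergeCount, hxy] using hp.cons x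
        · simp only [pvMergeCount, if_pos hxy]
          rw [List.pairwise_cons]
          refine ⟨?_, hs⟩
          intro z hz
          have hz' : z ∈ xs ++ y :: ys := hp.mem_iff.mp hz
          rcases List.mem_append.mp hz' with h | h
          · exact hlx z h
          · rcases List.mem_cons.mp h with rfl | h
            · exact hxy
            · exact le_trans hxy (hry z h)
        · have hzero : (y :: ys).countP (fun z => decide (z < x)) = 0 := by
            rw [List.countP_eq_zero]
            intro z hz
            simp only [decide_eq_true_eq]
            rcases List.mem_cons.mp hz with rfl | h
            · exact not_lt.mpr hxy
            · exact not_lt.mpr (le_trans hxy (hry z h))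
          simp only [pvMergeCount, if_pos hxy]
          rw [hc, pvCross_cons_left, hzero]
          simp
      · obtain ⟨hp, hs, hc⟩ := ihr hl hr'
        have hyx : y < x := not_le.mp hxy
        refine ⟨?_, ?_, ?_⟩
        · have := hp.cons y
          simp only [pvMergeCount, if_neg hxy]
          refine this.trans ?_
          have h1 : y :: ((x :: xs) ++ ys) = [y] ++ (x :: xs) ++ ys := by simp
          have h2 : (x :: xs) ++ y :: ys = (x :: xs) ++ [y] ++ ys := by simp
          rw [h1, h2]
          exact (List.perm_append_comm (l₁ := [y]) (l₂ := x :: xs)).append_right ys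
        · simp only [pvMergeCount, if_neg hxy]
          rw [List.pairwise_cons]
          refine ⟨?_, hs⟩
          intro z hz
          have hz' : z ∈ (x :: xs) ++ ys := hp.mem_iff.mp hz
          rcases List.mem_append.mp hz' with h | h
          · rcases List.mem_cons.mp h with rfl | h
            · exact le_of_lt hyx
            · exact le_trans (le_of_lt hyx) (hlx z h)
          · exact hry z h
        · have hall : (x :: xs).countP (fun u => decide (y < u)) = (x :: xs).length := by
            rw [List.countP_eq_length]
            intro u hu
            simp only [decide_eq_true_eq]
            rcases List.mem_cons.mp hu with rfl | h
            · exact hyx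
            · exact lt_of_lt_of_le hyx (hlx u h)
          simp only [pvMergeCount, if_neg hxy, PySem.List.len_eq]
          rw [hc, pvCross_cons_right, hall]
          push_cast
          ring

lemma pvMsortCount_spec : ∀ (a : List Int),
    (pvMsortCount a).1.Perm a ∧ (pvMsortCount a).1.Pairwise (· ≤ ·) ∧
      (pvMsortCount a).2 = (pvInv a : Int) := by
  intro a
  induction a using pvMsortCount.induct with
  | case1 a h =>
    have hinv : pvInv a = 0 := by
      match a, h with
      | [], _ => rfl
      | [x], _ => simp [pvInv]
    have hsort : a.Pairwise (· ≤ ·) := by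
      match a, h with
      | [], _ => simp
      | [x], _ => simp
    rw [pvMsortCount]
    simp [h, hinv, hsort]
  | case2 a h mid ih1 ih2 =>
    have hp1 := ih1.1
    have hs1 := ih1.2.1
    have hc1 := ih1.2.2
    have hp2 := ih2.1
    have hs2 := ih2.2.1
    have hc2 := ih2.2.2
    obtain ⟨hpm, hsm, hcm⟩ := pvMergeCount_spec _ _ hs1 hs2
    rw [pvMsortCount]
    simp only [h, dite_false, dif_neg, not_false_iff]
    have hsplit : a.take (a.length / 2) ++ a.drop (a.length / 2) = a := List.take_append_drop _ _
    refine ⟨?_, hsm, ?_⟩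
    · refine hpm.trans ?_
      refine (hp1.append hp2).trans ?_
      rw [hsplit]
    · rw [hcm, hc1, hc2]
      have hcross : pvCross (pvMsortCount (a.take (a.length / 2))).1
          (pvMsortCount (a.drop (a.length / 2))).1 =
          pvCross (a.take (a.length / 2)) (a.drop (a.length / 2)) := by
        rw [pvCross_perm_left _ hp1, pvCross_perm_right _ hp2]
      rw [hcross]
      have := pvInv_append (a.take (a.length / 2)) (a.drop (a.length / 2))
      rw [hsplit] at this
      rw [this]
      push_cast
      ring

lemma pvSign_eq (k : Nat) :
    ((-1 : Int)) ^ k = if PySem.Int.mod (k : Int) 2 = 0 then (1 : Int) else -1 := by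
  have h2 : PySem.Int.mod (k : Int) 2 = ((k % 2 : Nat) : Int) := by
    exact_mod_cast PySem.Int.mod_natCast k 2
  rcases Nat.even_or_odd k with he | ho
  · rw [he.neg_one_pow, h2, Nat.even_iff.mp he]
    simp
  · rw [ho.neg_one_pow, h2, Nat.odd_iff.mp ho]
    simp

-- ===== VERDICT (by name: the statement is the Claim_ definition above) =====
theorem sort_with_sign_py_spec : Claim_equal_sort_with_sign_py := by
  intro lst _
  unfold Spec_sort_with_sign_py
  obtain ⟨hAperm, hAsort, hAsign⟩ := pvA_spec lst
  obtain ⟨hBperm, hBsort, hBc⟩ := pvMsortCount_spec lst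
  have hlist : (sort_with_sign_py lst).2 = (pvMsortCount lst).1 :=
    List.Perm.eq_of_pairwise' hAsort hBsort (hAperm.trans hBperm.symm)
  have hsign : (sort_with_sign_py lst).1 =
      (if PySem.Int.mod (pvMsortCount lst).2 2 = 0 then (1 : Int) else -1) := by
    rw [hAsign, hBc, pvSign_eq]
  have halt : sort_with_sign_py_alt lst =
      ((if PySem.Int.mod (pvMsortCount lst).2 2 = 0 then (1 : Int) else -1),
        (pvMsortCount lst).1) := rfl
  rw [halt, ← hsign, ← hlist]
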